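-- pv_equiv track=rewrite | github.com/simonesestili/problems-dsa | leetcode/2312.py | sellingWood
-- ===== SOURCE A (Python) =====
-- def sellingWood(m, n, prices):
--     dp = [[0] * (n + 1) for _ in range(m + 1)]
--     for h, w, price in prices: dp[h][w] = price
--
--     for height in range(m + 1):
--         for width in range(n + 1):
--             for cut in range(1, height // 2 + 1):
--                 dp[height][width] = max(dp[height][width], dp[cut][width] + dp[height - cut][width])
--             for cut in range(1, width // 2 + 1):
--                 dp[height][width] = max(dp[height][width], dp[height][cut] + dp[height][width - cut])
--
--     return dp[m][n]
-- ===== SOURCE B (Python) =====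
-- def sellingWood(m, n, prices):
--     # Same seeded grid as the table version, then top-down memoized recursion
--     # (memo table indexed by (height, width)) instead of a bottom-up fill.
--     base = [[0] * (n + 1) for _ in range(m + 1)]
--     for h, w, price in prices:
--         base[h][w] = price
--
--     memo = [[None] * (n + 1) for _ in range(m + 1)]
--
--     def solve(h, w):
--         cached = memo[h][w]
--         if cached is not None:
--             return cached
--         best = base[h][w]
--         for cut in range(1, h // 2 + 1):
--             best = max(best, solve(cut, w) + solve(h - cut, w))
--         for cut in range(1, w // 2 + 1):
--             best = max(best, solve(h, cut) + solve(h, w - cut))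
--         memo[h][w] = best
--         return best
--
--     return solve(m, n)
-- ===== Notes on version B (the rewrite author's own statement) =====
-- stated objective: alternative
-- what changed: Replaces the bottom-up row-major DP table fill with top-down memoized recursion over (height, width) starting from (m, n), seeding the same base grid.
import Mathlib
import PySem

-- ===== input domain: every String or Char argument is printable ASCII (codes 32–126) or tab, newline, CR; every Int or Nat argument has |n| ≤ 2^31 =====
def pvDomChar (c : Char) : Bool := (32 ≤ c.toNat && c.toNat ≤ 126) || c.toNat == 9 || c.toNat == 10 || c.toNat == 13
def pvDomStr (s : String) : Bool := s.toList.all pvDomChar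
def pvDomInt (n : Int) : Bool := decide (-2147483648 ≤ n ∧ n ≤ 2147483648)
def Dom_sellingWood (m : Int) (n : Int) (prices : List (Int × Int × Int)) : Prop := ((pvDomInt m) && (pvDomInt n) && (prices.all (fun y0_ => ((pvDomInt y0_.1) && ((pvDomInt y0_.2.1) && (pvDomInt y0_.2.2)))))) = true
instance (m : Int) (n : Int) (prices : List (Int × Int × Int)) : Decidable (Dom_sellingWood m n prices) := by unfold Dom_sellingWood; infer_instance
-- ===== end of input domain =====

-- B replaces A's bottom-up row-major table fill by top-down memoized recursion from (m, n)
-- over the same seeded base grid (objective: alternative decomposition, no speed claim).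

-- ===== PORT A =====
-- dp[i][j] read with default d (in-range under Pre_; the default is never reached there)
def pvCell {α : Type} (dp : List (List α)) (d : α) (i j : Int) : α :=
  PySem.List.pyGetD (PySem.List.pyGetD dp i []) j d

-- dp[i][j] = v (Python in-place row update; out-of-range writes raise in Python = excluded by Pre_)
def pvSet {α : Type} (dp : List (List α)) (i j : Int) (v : α) : List (List α) :=
  PySem.List.pySetD dp i (PySem.List.pySetD (PySem.List.pyGetD dp i []) j v)

-- shared first two lines of both Pythons: [[0]*(n+1) for _ in range(m+1)] then 'for h, w, price in prices: dp[h][w] = price'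
def pvSeedGrid (m n : Int) (prices : List (Int × Int × Int)) : List (List Int) :=
  prices.foldl (fun dp p => pvSet dp p.1 p.2.1 p.2.2)
    ((PySem.List.pyRange 0 (m + 1) 1).map (fun _ => PySem.List.pyRepeat [0] (n + 1)))

def sellingWood (m : Int) (n : Int) (prices : List (Int × Int × Int)) : Int :=
  let dp0 := pvSeedGrid m n prices
  let dp := (PySem.List.pyRange 0 (m + 1) 1).foldl (fun dp height =>
    (PySem.List.pyRange 0 (n + 1) 1).foldl (fun dp width =>
      let dp := (PySem.List.pyRange 1 (PySem.Int.floordiv height 2 + 1) 1).foldl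
        (fun dp cut => pvSet dp height width
          (max (pvCell dp 0 height width) (pvCell dp 0 cut width + pvCell dp 0 (height - cut) width))) dp
      (PySem.List.pyRange 1 (PySem.Int.floordiv width 2 + 1) 1).foldl
        (fun dp cut => pvSet dp height width
          (max (pvCell dp 0 height width) (pvCell dp 0 height cut + pvCell dp 0 height (width - cut)))) dp) dp) dp0
  pvCell dp 0 m n

-- ===== PORT B =====
-- solve(h, w) with a memo table (None = not computed yet); the fuel argument only makes the
-- recursion structural (h+w strictly decreases, so the entry fuel m+n+1 is never exhausted)
def solveB (base : List (List Int)) : Nat → Nat → Nat → List (List (Option Int)) → Int × List (List (Option Int))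
  | 0, _, _, memo => (0, memo)
  | fuel+1, h, w, memo =>
    match pvCell memo none (h : Int) (w : Int) with
    | some cached => (cached, memo)
    | none =>
      let s1 := (List.range (h / 2)).foldl (fun s k =>
        let r1 := solveB base fuel (1 + k) w s.2
        let r2 := solveB base fuel (h - (1 + k)) w r1.2
        (max s.1 (r1.1 + r2.1), r2.2)) ((pvCell base 0 (h : Int) (w : Int), memo) : Int × List (List (Option Int)))
      let s2 := (List.range (w / 2)).foldl (fun s k =>
        let r1 := solveB base fuel h (1 + k) s.2
        let r2 := solveB base fuel h (w - (1 + k)) r1.2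
        (max s.1 (r1.1 + r2.1), r2.2)) s1
      (s2.1, pvSet s2.2 (h : Int) (w : Int) (some s2.1))

def sellingWood_alt (m : Int) (n : Int) (prices : List (Int × Int × Int)) : Int :=
  let base := pvSeedGrid m n prices
  let memo0 : List (List (Option Int)) :=
    (PySem.List.pyRange 0 (m + 1) 1).map (fun _ => PySem.List.pyRepeat [none] (n + 1))
  (solveB base (m.toNat + n.toNat + 1) m.toNat n.toNat memo0).1

-- ===== PRECONDITION & SPEC =====
-- Pre_ is exactly where the Python returns: nonnegative dimensions and every seed index a valid
-- Python index of the (m+1)×(n+1) table (negative indices wrap); outside, both Pythons raise IndexError.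
def Pre_sellingWood (m : Int) (n : Int) (prices : List (Int × Int × Int)) : Prop :=
  0 ≤ m ∧ 0 ≤ n ∧ ∀ p ∈ prices, (-(m + 1) ≤ p.1 ∧ p.1 ≤ m) ∧ (-(n + 1) ≤ p.2.1 ∧ p.2.1 ≤ n)
instance (m : Int) (n : Int) (prices : List (Int × Int × Int)) : Decidable (Pre_sellingWood m n prices) := by unfold Pre_sellingWood; infer_instance

def pvWitness_sellingWood : Int × Int × (List (Int × Int × Int)) := (2, 3, [(1, 2, 3), (-1, 1, 4)])

def Spec_sellingWood (m : Int) (n : Int) (prices : List (Int × Int × Int)) (out : Int) : Prop := out = sellingWood_alt m n prices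
instance (m : Int) (n : Int) (prices : List (Int × Int × Int)) (out : Int) : Decidable (Spec_sellingWood m n prices out) := by unfold Spec_sellingWood; infer_instance

-- ===== CLAIM (what is proved, stated in full; the proofs are below) =====
def Claim_equal_sellingWood : Prop := ∀ (m : Int) (n : Int) (prices : List (Int × Int × Int)), Dom_sellingWood m n prices → Pre_sellingWood m n prices → Spec_sellingWood m n prices (sellingWood m n prices)

-- ===== LEMMAS AND PROOFS =====

-- proof-side cell read with Nat indices (definitionally pvCell at cast indices)
def bf (dp : List (List Int)) (i j : Nat) : Int := pvCell dp 0 (i : Int) (j : Int)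

-- the ideal value of a block (fuel-indexed; V is the stable value)
def Vf (dp : List (List Int)) : Nat → Nat → Nat → Int
  | 0, h, w => bf dp h w
  | fuel+1, h, w =>
    (List.range (w / 2)).foldl
      (fun b k => max b (Vf dp fuel h (1 + k) + Vf dp fuel h (w - (1 + k))))
      ((List.range (h / 2)).foldl
        (fun b k => max b (Vf dp fuel (1 + k) w + Vf dp fuel (h - (1 + k)) w))
        (bf dp h w))

def V (dp : List (List Int)) (h w : Nat) : Int := Vf dp (h + w) h w

lemma Vf_stable (dp : List (List Int)) :
    ∀ f1 f2 h w, h + w ≤ f1 → h + w ≤ f2 → Vf dp f1 h w = Vf dp f2 h w := by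
  intro f1
  induction f1 with
  | zero =>
    intro f2 h w h1 _
    have hh : h = 0 := by omega
    have hw : w = 0 := by omega
    subst hh; subst hw
    cases f2 with
    | zero => rfl
    | succ f2 => simp [Vf]
  | succ f1 ih =>
    intro f2 h w h1 h2
    cases f2 with
    | zero =>
      have hh : h = 0 := by omega
      have hw : w = 0 := by omega
      subst hh; subst hw
      simp [Vf]
    | succ f2 =>
      simp only [Vf]
      have hinner :
          (List.range (h / 2)).foldl (fun b k => max b (Vf dp f1 (1 + k) w + Vf dp f1 (h - (1 + k)) w)) (bf dp h w)
        = (List.range (h / 2)).foldl (fun b k => max b (Vf dp f2 (1 + k) w + Vf dp f2 (h - (1 + k)) w)) (bf dp h w) := by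
        apply PySem.List.foldl_congr_mem
        intro acc k hk
        have hk' : k < h / 2 := List.mem_range.mp hk
        rw [ih f2 (1 + k) w (by omega) (by omega), ih f2 (h - (1 + k)) w (by omega) (by omega)]
      rw [hinner]
      apply PySem.List.foldl_congr_mem
      intro acc k hk
      have hk' : k < w / 2 := List.mem_range.mp hk
      rw [ih f2 h (1 + k) (by omega) (by omega), ih f2 h (w - (1 + k)) (by omega) (by omega)]

lemma V_eq (dp : List (List Int)) (h w : Nat) :
    V dp h w = (List.range (w / 2)).foldl
      (fun b k => max b (V dp h (1 + k) + V dp h (w - (1 + k))))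
      ((List.range (h / 2)).foldl
        (fun b k => max b (V dp (1 + k) w + V dp (h - (1 + k)) w))
        (bf dp h w)) := by
  rcases hf : h + w with _ | f
  · have hh : h = 0 := by omega
    have hw : w = 0 := by omega
    subst hh; subst hw
    simp [V, Vf]
  · rw [show V dp h w = Vf dp (f + 1) h w by unfold V; rw [hf]]
    simp only [Vf]
    have hinner :
        (List.range (h / 2)).foldl (fun b k => max b (Vf dp f (1 + k) w + Vf dp f (h - (1 + k)) w)) (bf dp h w)
      = (List.range (h / 2)).foldl (fun b k => max b (V dp (1 + k) w + V dp (h - (1 + k)) w)) (bf dp h w) := by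
      apply PySem.List.foldl_congr_mem
      intro acc k hk
      have hk' : k < h / 2 := List.mem_range.mp hk
      simp only [V]
      rw [Vf_stable dp f ((1 + k) + w) (1 + k) w (by omega) (by omega),
          Vf_stable dp f ((h - (1 + k)) + w) (h - (1 + k)) w (by omega) (by omega)]
    rw [hinner]
    apply PySem.List.foldl_congr_mem
    intro acc k hk
    have hk' : k < w / 2 := List.mem_range.mp hk
    simp only [V]
    rw [Vf_stable dp f (h + (1 + k)) h (1 + k) (by omega) (by omega),
        Vf_stable dp f (h + (w - (1 + k))) h (w - (1 + k)) (by omega) (by omega)]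

-- ----- generic fold-with-invariant over List.range -----
lemma foldl_range_inv {α : Type} (P : Nat → α → Prop) (f : α → Nat → α) :
    ∀ n, (∀ k a, k < n → P k a → P (k+1) (f a k)) → ∀ a, P 0 a → P n ((List.range n).foldl f a)
  | 0, _, a, h0 => by simpa using h0
  | n+1, step, a, h0 => by
    rw [List.range_succ, List.foldl_append]
    simpa using step n _ (Nat.lt_succ_self n)
      (foldl_range_inv P f n (fun k a hk => step k a (hk.trans (Nat.lt_succ_self n))) a h0)

-- ----- A side -----
def ShapeG {α : Type} (M N : Nat) (dp : List (List α)) : Prop :=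
  dp.length = M + 1 ∧ ∀ row ∈ dp, row.length = N + 1

lemma shape_row {α : Type} {M N : Nat} {dp : List (List α)} (hsh : ShapeG M N dp) {i : Nat} (hi : i ≤ M) :
    (dp.getD i []).length = N + 1 := by
  obtain ⟨h1, h2⟩ := hsh
  have hlt : i < dp.length := by omega
  rw [List.getD_eq_getElem dp [] hlt]
  exact h2 _ (dp.getElem_mem hlt)

lemma cell_pvSet {α : Type} {M N : Nat} {dp : List (List α)} (hsh : ShapeG M N dp) {h w : Nat}
    (hh : h ≤ M) (hw : w ≤ N) (v d : α) (i j : Nat) :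
    pvCell (pvSet dp (h : Int) (w : Int) v) d (i : Int) (j : Int)
      = if i = h ∧ j = w then v else pvCell dp d (i : Int) (j : Int) := by
  have hrl : (dp.getD h []).length = N + 1 := shape_row hsh hh
  have hhl : h < dp.length := by obtain ⟨h1, _⟩ := hsh; omega
  simp only [pvCell, pvSet, PySem.List.pyGetD_natCast, PySem.List.pySetD_natCast]
  simp only [List.getD_eq_getElem?_getD]
  rw [List.getD_eq_getElem?_getD] at hrl
  by_cases hi : i = h
  · subst hi
    rw [List.getElem?_set_self hhl]
    simp only [Option.getD_some]
    by_cases hj : j = w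
    · subst hj
      rw [List.getElem?_set_self (by omega)]
      simp
    · rw [List.getElem?_set_ne (fun he => hj he.symm)]
      simp [hj]
  · rw [List.getElem?_set_ne (fun he => hi he.symm)]
    simp [hi]

lemma bf_pvSet {M N : Nat} {dp : List (List Int)} (hsh : ShapeG M N dp) {h w : Nat}
    (hh : h ≤ M) (hw : w ≤ N) (v : Int) (i j : Nat) :
    bf (pvSet dp (h : Int) (w : Int) v) i j = if i = h ∧ j = w then v else bf dp i j :=
  cell_pvSet hsh hh hw v 0 i j

lemma shape_pvSet {α : Type} {M N : Nat} {dp : List (List α)} (hsh : ShapeG M N dp) {h w : Nat}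
    (hh : h ≤ M) (_hw : w ≤ N) (v : α) : ShapeG M N (pvSet dp (h : Int) (w : Int) v) := by
  have hrl : (dp.getD h []).length = N + 1 := shape_row hsh hh
  obtain ⟨h1, h2⟩ := hsh
  simp only [pvSet, PySem.List.pyGetD_natCast, PySem.List.pySetD_natCast]
  refine ⟨by simpa using h1, fun row hrow => ?_⟩
  rcases List.mem_or_eq_of_mem_set hrow with hmem | heq
  · exact h2 _ hmem
  · subst heq; simpa using hrl

lemma mem_pySetD {α : Type} (xs : List α) (i : Int) (v x : α)
    (h : x ∈ PySem.List.pySetD xs i v) :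
    x ∈ xs ∨ (x = v ∧ PySem.Raise.InRange xs.length i) := by
  simp only [PySem.List.pySetD, PySem.List.pySet?] at h
  rcases hk : PySem.List.pyIdx? xs.length i with _ | k <;> rw [hk] at h <;> simp at h
  · left; exact h
  · rcases List.mem_or_eq_of_mem_set h with h1 | h1
    · left; exact h1
    · right
      refine ⟨h1, ?_⟩
      simp only [PySem.List.pyIdx?] at hk
      split_ifs at hk <;> simp only [PySem.Raise.InRange] <;> omega

lemma shape_pvSet_any {α : Type} {M N : Nat} {dp : List (List α)} (hsh : ShapeG M N dp) (i j : Int) (v : α) :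
    ShapeG M N (pvSet dp i j v) := by
  obtain ⟨h1, h2⟩ := hsh
  refine ⟨by simp [pvSet, PySem.List.length_pySetD, h1], fun row hrow => ?_⟩
  rcases mem_pySetD _ _ _ _ hrow with hmem | ⟨rfl, hr⟩
  · exact h2 _ hmem
  · rw [PySem.List.length_pySetD]
    exact h2 _ (PySem.List.pyGetD_mem dp [] hr)

lemma grid_shape {α : Type} (m n : Int) (x : α) (hm : 0 ≤ m) (hn : 0 ≤ n) :
    ShapeG m.toNat n.toNat ((PySem.List.pyRange 0 (m + 1) 1).map (fun _ => PySem.List.pyRepeat [x] (n + 1))) := by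
  constructor
  · rw [List.length_map, PySem.List.length_pyRange_one]; omega
  · intro row hrow
    rcases List.mem_map.mp hrow with ⟨_, _, rfl⟩
    rw [PySem.List.pyRepeat_singleton, List.length_replicate]; omega

lemma seed_shape (m n : Int) (prices : List (Int × Int × Int)) (hm : 0 ≤ m) (hn : 0 ≤ n) :
    ShapeG m.toNat n.toNat (pvSeedGrid m n prices) := by
  unfold pvSeedGrid
  have H : ∀ (ps : List (Int × Int × Int)) (dp : List (List Int)), ShapeG m.toNat n.toNat dp →
      ShapeG m.toNat n.toNat (ps.foldl (fun dp p => pvSet dp p.1 p.2.1 p.2.2) dp) := by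
    intro ps
    induction ps with
    | nil => intro dp h; exact h
    | cons q qs ih => intro dp h; exact ih _ (shape_pvSet_any h _ _ _)
  exact H _ _ (grid_shape m n 0 hm hn)

-- a fold that rewrites only cell (h,w), reading cells distinct from it
lemma fold_writes_cell {M N : Nat} {dp : List (List Int)} (hsh : ShapeG M N dp) {h w : Nat}
    (hh : h ≤ M) (hw : w ≤ N) (L : Nat) (u1 v1 u2 v2 : Nat → Nat)
    (hne : ∀ k, k < L → (u1 k ≠ h ∨ v1 k ≠ w) ∧ (u2 k ≠ h ∨ v2 k ≠ w)) :
    ShapeG M N ((List.range L).foldl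
        (fun dp k => pvSet dp (h : Int) (w : Int)
          (max (bf dp h w) (bf dp (u1 k) (v1 k) + bf dp (u2 k) (v2 k)))) dp) ∧
    ∀ i j, bf ((List.range L).foldl
        (fun dp k => pvSet dp (h : Int) (w : Int)
          (max (bf dp h w) (bf dp (u1 k) (v1 k) + bf dp (u2 k) (v2 k)))) dp) i j
      = if i = h ∧ j = w
        then (List.range L).foldl (fun b k => max b (bf dp (u1 k) (v1 k) + bf dp (u2 k) (v2 k))) (bf dp h w)
        else bf dp i j := by
  refine foldl_range_inv
    (fun k R => ShapeG M N R ∧ ∀ i j, bf R i j =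
      if i = h ∧ j = w
      then (List.range k).foldl (fun b k => max b (bf dp (u1 k) (v1 k) + bf dp (u2 k) (v2 k))) (bf dp h w)
      else bf dp i j)
    _ L ?_ dp ⟨hsh, ?_⟩
  · intro k R hk hR
    obtain ⟨hshR, hbfR⟩ := hR
    have hval : bf R h w = (List.range k).foldl (fun b k => max b (bf dp (u1 k) (v1 k) + bf dp (u2 k) (v2 k))) (bf dp h w) := by
      rw [hbfR h w]; simp
    have hr1 : bf R (u1 k) (v1 k) = bf dp (u1 k) (v1 k) := by
      rw [hbfR]
      rcases (hne k hk).1 with hx | hx <;> simp [hx]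
    have hr2 : bf R (u2 k) (v2 k) = bf dp (u2 k) (v2 k) := by
      rw [hbfR]
      rcases (hne k hk).2 with hx | hx <;> simp [hx]
    refine ⟨shape_pvSet hshR hh hw _, ?_⟩
    intro i j
    rw [bf_pvSet hshR hh hw]
    by_cases hij : i = h ∧ j = w
    · simp only [hij]
      rw [List.range_succ, List.foldl_append, List.foldl_cons, List.foldl_nil, hval, hr1, hr2]
      simp
    · simp only [hij, if_false]
      rw [hbfR i j]
      simp [hij]
  · intro i j
    by_cases hij : i = h ∧ j = w
    · obtain ⟨rfl, rfl⟩ := hij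
      simp
    · simp [hij]

def InvA (dp1 dp : List (List Int)) (M N h w : Nat) : Prop :=
  ShapeG M N dp ∧ ∀ i j, i ≤ M → j ≤ N →
    bf dp i j = if i < h ∨ (i = h ∧ j < w) then V dp1 i j else bf dp1 i j

lemma invA_init (dp1 : List (List Int)) (M N : Nat) (hsh : ShapeG M N dp1) : InvA dp1 dp1 M N 0 0 := by
  refine ⟨hsh, fun i j _ _ => ?_⟩
  have hc : ¬(i < 0 ∨ (i = 0 ∧ j < 0)) := by omega
  rw [if_neg hc]

lemma invA_shift (dp1 dp : List (List Int)) (M N i : Nat) (h : InvA dp1 dp M N i (N + 1)) :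
    InvA dp1 dp M N (i + 1) 0 := by
  refine ⟨h.1, fun i' j' hi' hj' => ?_⟩
  rw [h.2 i' j' hi' hj']
  have hiff : (i' < i ∨ (i' = i ∧ j' < N + 1)) ↔ (i' < i + 1 ∨ (i' = i + 1 ∧ j' < 0)) := by omega
  rw [if_congr hiff rfl rfl]

lemma cell_step (dp1 dpw : List (List Int)) (M N i j : Nat)
    (hInvw : InvA dp1 dpw M N i j) (hi : i ≤ M) (hj : j ≤ N) :
    InvA dp1
      ((List.range (j / 2)).foldl
        (fun dp k => pvSet dp (i : Int) (j : Int)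
          (max (bf dp i j) (bf dp i (1 + k) + bf dp i (j - (1 + k)))))
        ((List.range (i / 2)).foldl
          (fun dp k => pvSet dp (i : Int) (j : Int)
            (max (bf dp i j) (bf dp (1 + k) j + bf dp (i - (1 + k)) j)))
          dpw))
      M N i (j + 1) := by
  obtain ⟨hshw, hbfw⟩ := hInvw
  have HF := fold_writes_cell hshw hi hj (i / 2)
    (fun k => 1 + k) (fun _ => j) (fun k => i - (1 + k)) (fun _ => j)
    (fun k hk => by simp only []; constructor <;> [left; left] <;> omega)
  simp only [] at HF
  obtain ⟨hshH, hbfH⟩ := HF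
  have HG := fold_writes_cell hshH hi hj (j / 2)
    (fun _ => i) (fun k => 1 + k) (fun _ => i) (fun k => j - (1 + k))
    (fun k hk => by simp only []; constructor <;> [right; right] <;> omega)
  simp only [] at HG
  obtain ⟨hshV, hbfV⟩ := HG
  refine ⟨hshV, fun i' j' hi' hj' => ?_⟩
  rw [hbfV i' j']
  by_cases hij : i' = i ∧ j' = j
  · obtain ⟨rfl, rfl⟩ := hij
    rw [if_pos ⟨rfl, rfl⟩, if_pos (by omega)]
    -- compute the produced cell value and identify it with V dp1 i' j'
    have hinit : bf ((List.range (i' / 2)).foldl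
          (fun dp k => pvSet dp (i' : Int) (j' : Int)
            (max (bf dp i' j') (bf dp (1 + k) j' + bf dp (i' - (1 + k)) j'))) dpw) i' j'
        = (List.range (i' / 2)).foldl
            (fun b k => max b (bf dpw (1 + k) j' + bf dpw (i' - (1 + k)) j')) (bf dpw i' j') := by
      rw [hbfH i' j', if_pos ⟨rfl, rfl⟩]
    rw [hinit]
    -- replace reads of dpH by reads of dpw inside the vertical pure fold
    have hv : ∀ (b : Int), (List.range (j' / 2)).foldl
          (fun b k => max b (bf ((List.range (i' / 2)).foldl
              (fun dp k => pvSet dp (i' : Int) (j' : Int)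
                (max (bf dp i' j') (bf dp (1 + k) j' + bf dp (i' - (1 + k)) j'))) dpw) i' (1 + k)
            + bf ((List.range (i' / 2)).foldl
              (fun dp k => pvSet dp (i' : Int) (j' : Int)
                (max (bf dp i' j') (bf dp (1 + k) j' + bf dp (i' - (1 + k)) j'))) dpw) i' (j' - (1 + k)))) b
        = (List.range (j' / 2)).foldl
            (fun b k => max b (V dp1 i' (1 + k) + V dp1 i' (j' - (1 + k)))) b := by
      intro b
      apply PySem.List.foldl_congr_mem
      intro acc k hk
      have hk' : k < j' / 2 := List.mem_range.mp hk
      rw [hbfH i' (1 + k), if_neg (by omega), hbfH i' (j' - (1 + k)), if_neg (by omega),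
        hbfw i' (1 + k) hi' (by omega), if_pos (by omega),
        hbfw i' (j' - (1 + k)) hi' (by omega), if_pos (by omega)]
    rw [hv]
    -- replace reads in the horizontal pure fold
    have hh : (List.range (i' / 2)).foldl
          (fun b k => max b (bf dpw (1 + k) j' + bf dpw (i' - (1 + k)) j')) (bf dpw i' j')
        = (List.range (i' / 2)).foldl
            (fun b k => max b (V dp1 (1 + k) j' + V dp1 (i' - (1 + k)) j')) (bf dp1 i' j') := by
      rw [hbfw i' j' hi' hj', if_neg (by omega)]
      apply PySem.List.foldl_congr_mem
      intro acc k hk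
      have hk' : k < i' / 2 := List.mem_range.mp hk
      rw [hbfw (1 + k) j' (by omega) hj', if_pos (by omega),
        hbfw (i' - (1 + k)) j' (by omega) hj', if_pos (by omega)]
    rw [hh, ← V_eq]
  · rw [if_neg hij, hbfH i' j', if_neg hij, hbfw i' j' hi' hj']
    have hiff : (i' < i ∨ (i' = i ∧ j' < j)) ↔ (i' < i ∨ (i' = i ∧ j' < j + 1)) := by
      omega
    rw [if_congr hiff rfl rfl]

lemma A_eq_V (m n : Int) (prices : List (Int × Int × Int)) (hm : 0 ≤ m) (hn : 0 ≤ n) :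
    sellingWood m n prices = V (pvSeedGrid m n prices) m.toNat n.toNat := by
  obtain ⟨M, rfl⟩ : ∃ M : Nat, m = (M : Int) := ⟨m.toNat, (Int.toNat_of_nonneg hm).symm⟩
  obtain ⟨N, rfl⟩ : ∃ N : Nat, n = (N : Int) := ⟨n.toNat, (Int.toNat_of_nonneg hn).symm⟩
  have hsh1 : ShapeG M N (pvSeedGrid (M : Int) (N : Int) prices) := by
    simpa using seed_shape (M : Int) (N : Int) prices (by positivity) (by positivity)
  simp only [Int.toNat_natCast, sellingWood]
  rw [PySem.List.pyRange_one 0 ((M : Int) + 1),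
    show (((M : Int) + 1 - 0).toNat) = M + 1 from by omega, List.foldl_map]
  suffices H : ∀ dpk, InvA (pvSeedGrid (M : Int) (N : Int) prices) dpk M N (M + 1) 0 →
      pvCell dpk 0 (M : Int) (N : Int) = V (pvSeedGrid (M : Int) (N : Int) prices) M N by
    apply H
    refine foldl_range_inv (fun h dpk => InvA (pvSeedGrid (M : Int) (N : Int) prices) dpk M N h 0) _ (M + 1) ?_ _ (invA_init _ M N hsh1)
    intro i dpk hik hInv
    simp only [zero_add]
    rw [PySem.List.pyRange_one 0 ((N : Int) + 1),
      show (((N : Int) + 1 - 0).toNat) = N + 1 from by omega, List.foldl_map]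
    refine invA_shift _ _ _ _ _ ?_
    refine foldl_range_inv (fun w dpw => InvA (pvSeedGrid (M : Int) (N : Int) prices) dpw M N i w) _ (N + 1) ?_ _ hInv
    intro j dpw hjk hInvw
    simp only [zero_add]
    rw [show PySem.Int.floordiv (i : Int) 2 = ((i / 2 : Nat) : Int) from
        by exact_mod_cast PySem.Int.floordiv_natCast i 2,
      show PySem.Int.floordiv (j : Int) 2 = ((j / 2 : Nat) : Int) from
        by exact_mod_cast PySem.Int.floordiv_natCast j 2,
      PySem.List.pyRange_one 1 (((i / 2 : Nat) : Int) + 1),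
      PySem.List.pyRange_one 1 (((j / 2 : Nat) : Int) + 1),
      show ((((i / 2 : Nat) : Int) + 1 - 1).toNat) = i / 2 from by omega,
      show ((((j / 2 : Nat) : Int) + 1 - 1).toNat) = j / 2 from by omega,
      List.foldl_map, List.foldl_map]
    have hH : (List.range (i / 2)).foldl
          (fun (dp : List (List Int)) (k : Nat) => pvSet dp (i : Int) (j : Int)
            (max (pvCell dp 0 (i : Int) (j : Int))
              (pvCell dp 0 (1 + (k : Int)) (j : Int) + pvCell dp 0 ((i : Int) - (1 + (k : Int))) (j : Int)))) dpw
        = (List.range (i / 2)).foldl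
          (fun dp k => pvSet dp (i : Int) (j : Int)
            (max (bf dp i j) (bf dp (1 + k) j + bf dp (i - (1 + k)) j))) dpw := by
      apply PySem.List.foldl_congr_mem
      intro acc k hk
      have hk' : k < i / 2 := List.mem_range.mp hk
      have c1 : (1 + (k : Int)) = ((1 + k : Nat) : Int) := by omega
      have c2 : ((i : Int) - (1 + (k : Int))) = ((i - (1 + k) : Nat) : Int) := by omega
      rw [c2, c1]
      rfl
    have hV : ∀ X : List (List Int), (List.range (j / 2)).foldl
          (fun (dp : List (List Int)) (k : Nat) => pvSet dp (i : Int) (j : Int)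
            (max (pvCell dp 0 (i : Int) (j : Int))
              (pvCell dp 0 (i : Int) (1 + (k : Int)) + pvCell dp 0 (i : Int) ((j : Int) - (1 + (k : Int)))))) X
        = (List.range (j / 2)).foldl
          (fun dp k => pvSet dp (i : Int) (j : Int)
            (max (bf dp i j) (bf dp i (1 + k) + bf dp i (j - (1 + k))))) X := by
      intro X
      apply PySem.List.foldl_congr_mem
      intro acc k hk
      have hk' : k < j / 2 := List.mem_range.mp hk
      have c1 : (1 + (k : Int)) = ((1 + k : Nat) : Int) := by omega
      have c2 : ((j : Int) - (1 + (k : Int))) = ((j - (1 + k) : Nat) : Int) := by omega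
      rw [c2, c1]
      rfl
    rw [hH, hV]
    exact cell_step _ dpw M N i j hInvw (by omega) (by omega)
  intro dpk hInv
  obtain ⟨-, hbf⟩ := hInv
  have hfin := hbf M N le_rfl le_rfl
  rw [if_pos (by omega)] at hfin
  exact hfin

-- ----- B side -----
def bfO (t : List (List (Option Int))) (i j : Nat) : Option Int := pvCell t none (i : Int) (j : Int)

def MemoOK (dp : List (List Int)) (memo : List (List (Option Int))) : Prop :=
  ∀ a b v, bfO memo a b = some v → v = V dp a b

lemma solveB_correct (dp : List (List Int)) (M N : Nat) :
    ∀ fuel h w memo, h + w < fuel → h ≤ M → w ≤ N → ShapeG M N memo → MemoOK dp memo →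
      (solveB dp fuel h w memo).1 = V dp h w ∧ ShapeG M N (solveB dp fuel h w memo).2
        ∧ MemoOK dp (solveB dp fuel h w memo).2 := by
  intro fuel
  induction fuel with
  | zero => intro h w memo hlt; omega
  | succ fuel ih =>
    intro h w memo hlt hhM hwN hshm hmem
    rw [solveB]
    cases hg : pvCell memo none (h : Int) (w : Int) with
    | some v =>
      simp only []
      exact ⟨hmem h w v hg, hshm, hmem⟩
    | none =>
      simp only []
      have Hh : ∀ cs : List Nat, (∀ k ∈ cs, k < h / 2) →
          ∀ (b : Int) (mo : List (List (Option Int))), ShapeG M N mo → MemoOK dp mo →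
          (cs.foldl (fun s k =>
              let r1 := solveB dp fuel (1 + k) w s.2
              let r2 := solveB dp fuel (h - (1 + k)) w r1.2
              (max s.1 (r1.1 + r2.1), r2.2)) (b, mo)).1
            = cs.foldl (fun b k => max b (V dp (1 + k) w + V dp (h - (1 + k)) w)) b
          ∧ ShapeG M N ((cs.foldl (fun s k =>
              let r1 := solveB dp fuel (1 + k) w s.2
              let r2 := solveB dp fuel (h - (1 + k)) w r1.2
              (max s.1 (r1.1 + r2.1), r2.2)) (b, mo)).2)
          ∧ MemoOK dp ((cs.foldl (fun s k =>
              let r1 := solveB dp fuel (1 + k) w s.2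
              let r2 := solveB dp fuel (h - (1 + k)) w r1.2
              (max s.1 (r1.1 + r2.1), r2.2)) (b, mo)).2) := by
        intro cs
        induction cs with
        | nil => intro _ b mo hsho hmo; exact ⟨rfl, hsho, hmo⟩
        | cons c cs ihc =>
          intro hcs b mo hsho hmo
          have hc : c < h / 2 := hcs c (List.mem_cons_self ..)
          have e1 := ih (1 + c) w mo (by omega) (by omega) hwN hsho hmo
          have e2 := ih (h - (1 + c)) w _ (by omega) (by omega) hwN e1.2.1 e1.2.2
          simp only [List.foldl_cons]
          obtain ⟨hA, hB, hC⟩ := ihc (fun k hk => hcs k (List.mem_cons_of_mem _ hk)) _ _ e2.2.1 e2.2.2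
          refine ⟨?_, hB, hC⟩
          rw [hA, e1.1, e2.1]
      have Hv : ∀ cs : List Nat, (∀ k ∈ cs, k < w / 2) →
          ∀ (b : Int) (mo : List (List (Option Int))), ShapeG M N mo → MemoOK dp mo →
          (cs.foldl (fun s k =>
              let r1 := solveB dp fuel h (1 + k) s.2
              let r2 := solveB dp fuel h (w - (1 + k)) r1.2
              (max s.1 (r1.1 + r2.1), r2.2)) (b, mo)).1
            = cs.foldl (fun b k => max b (V dp h (1 + k) + V dp h (w - (1 + k)))) b
          ∧ ShapeG M N ((cs.foldl (fun s k =>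
              let r1 := solveB dp fuel h (1 + k) s.2
              let r2 := solveB dp fuel h (w - (1 + k)) r1.2
              (max s.1 (r1.1 + r2.1), r2.2)) (b, mo)).2)
          ∧ MemoOK dp ((cs.foldl (fun s k =>
              let r1 := solveB dp fuel h (1 + k) s.2
              let r2 := solveB dp fuel h (w - (1 + k)) r1.2
              (max s.1 (r1.1 + r2.1), r2.2)) (b, mo)).2) := by
        intro cs
        induction cs with
        | nil => intro _ b mo hsho hmo; exact ⟨rfl, hsho, hmo⟩
        | cons c cs ihc =>
          intro hcs b mo hsho hmo
          have hc : c < w / 2 := hcs c (List.mem_cons_self ..)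
          have e1 := ih h (1 + c) mo (by omega) hhM (by omega) hsho hmo
          have e2 := ih h (w - (1 + c)) _ (by omega) hhM (by omega) e1.2.1 e1.2.2
          simp only [List.foldl_cons]
          obtain ⟨hA, hB, hC⟩ := ihc (fun k hk => hcs k (List.mem_cons_of_mem _ hk)) _ _ e2.2.1 e2.2.2
          refine ⟨?_, hB, hC⟩
          rw [hA, e1.1, e2.1]
      obtain ⟨h1a, h1b, h1c⟩ := Hh (List.range (h / 2)) (fun k hk => List.mem_range.mp hk)
        (pvCell dp 0 (h : Int) (w : Int)) memo hshm hmem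
      obtain ⟨h2a, h2b, h2c⟩ := Hv (List.range (w / 2)) (fun k hk => List.mem_range.mp hk) _ _ h1b h1c
      have hbest : ((List.range (w / 2)).foldl (fun s k =>
            let r1 := solveB dp fuel h (1 + k) s.2
            let r2 := solveB dp fuel h (w - (1 + k)) r1.2
            (max s.1 (r1.1 + r2.1), r2.2))
          ((List.range (h / 2)).foldl (fun s k =>
            let r1 := solveB dp fuel (1 + k) w s.2
            let r2 := solveB dp fuel (h - (1 + k)) w r1.2
            (max s.1 (r1.1 + r2.1), r2.2)) (pvCell dp 0 (h : Int) (w : Int), memo))).1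
          = V dp h w := by
        rw [h2a, h1a, V_eq]
        rfl
      refine ⟨hbest, shape_pvSet h2b hhM hwN _, ?_⟩
      intro a b v hab
      rw [show bfO (pvSet _ (h : Int) (w : Int) _) a b
            = if a = h ∧ b = w then some ((List.range (w / 2)).foldl (fun s k =>
                let r1 := solveB dp fuel h (1 + k) s.2
                let r2 := solveB dp fuel h (w - (1 + k)) r1.2
                (max s.1 (r1.1 + r2.1), r2.2))
              ((List.range (h / 2)).foldl (fun s k =>
                let r1 := solveB dp fuel (1 + k) w s.2
                let r2 := solveB dp fuel (h - (1 + k)) w r1.2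
                (max s.1 (r1.1 + r2.1), r2.2)) (pvCell dp 0 (h : Int) (w : Int), memo))).1
              else bfO _ a b
          from cell_pvSet h2b hhM hwN _ none a b] at hab
      by_cases hij : a = h ∧ b = w
      · rw [if_pos hij] at hab
        obtain ⟨rfl, rfl⟩ := hij
        rw [← Option.some_inj.mp hab, hbest]
      · rw [if_neg hij] at hab
        exact h2c a b v hab

lemma B_eq_V (m n : Int) (prices : List (Int × Int × Int)) (hm : 0 ≤ m) (hn : 0 ≤ n) :
    sellingWood_alt m n prices = V (pvSeedGrid m n prices) m.toNat n.toNat := by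
  unfold sellingWood_alt
  refine (solveB_correct _ m.toNat n.toNat _ _ _ _ (by omega) le_rfl le_rfl (grid_shape m n none hm hn) ?_).1
  intro a b v hab
  exfalso
  revert hab
  simp only [bfO, pvCell, PySem.List.pyGetD_natCast, List.getD_eq_getElem?_getD]
  rcases ha : ((PySem.List.pyRange 0 (m + 1) 1).map (fun _ => PySem.List.pyRepeat [(none : Option Int)] (n + 1)))[a]? with _ | row
  · simp
  · simp only [Option.getD_some]
    have hrow : row ∈ (PySem.List.pyRange 0 (m + 1) 1).map (fun _ => PySem.List.pyRepeat [(none : Option Int)] (n + 1)) :=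
      List.mem_of_getElem? ha
    rcases List.mem_map.mp hrow with ⟨_, _, rfl⟩
    rw [PySem.List.pyRepeat_singleton, List.getElem?_replicate]
    split <;> simp

-- ===== VERDICT (by name: the statement is the Claim_ definition above) =====
theorem sellingWood_spec : Claim_equal_sellingWood := by
  intro m n prices _ hpre
  obtain ⟨hm, hn, -⟩ := hpre
  unfold Spec_sellingWood
  rw [A_eq_V m n prices hm hn, B_eq_V m n prices hm hn]
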